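-- pv_equiv track=rewrite | github.com/ChanghyunRyu/Python-CodingTest-note | samsaug_SW/runway/runway.py | check_runway
-- ===== SOURCE A (Python) =====
-- def check_runway(line, need):
--     check = [False]*len(line)
--     for i in range(len(line)-1):
--         if line[i] == line[i+1]:
--             continue
--         elif abs(line[i]-line[i+1]) > 1:
--             return False
--         # 경사로 설치할 수 있는지 체크
--         if line[i] > line[i+1]:
--             for step in range(1, need+1):
--                 ni = i+step
--                 if ni >= len(line):
--                     return False
--                 if not check[ni]:
--                     check[ni] = True
--                 else:
--                     return False
--         else:
--             for step in range(1, need+1):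
--                 ni = i-need+step
--                 if ni < 0:
--                     return False
--                 if not check[ni]:
--                     check[ni] = True
--                 else:
--                     return False
--     return True
-- ===== SOURCE B (Python) =====
-- def check_runway(line, need):
--     # O(n): track `used`, the highest index already consumed by a ramp,
--     # instead of marking every ramp cell in a boolean array.
--     n = len(line)
--     used = -1
--     for i in range(n - 1):
--         d = line[i + 1] - line[i]
--         if d == 0:
--             continue
--         if d != 1 and d != -1:
--             return False
--         if need <= 0:
--             continue
--         if d == -1:
--             if i + need >= n or used >= i + 1:
--                 return False
--             used = i + need
--         else:
--             if i - need + 1 < 0 or used >= i - need + 1: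
--                 return False
--             used = i
--     return True
-- ===== Notes on version B (the rewrite author's own statement) =====
-- stated objective: alternative
-- what changed: Replaces A's boolean mark array and per-cell inner marking loops with a single integer 'used' (highest index already consumed by a ramp), deciding each ramp placement by one interval comparison per height change.
import Mathlib
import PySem

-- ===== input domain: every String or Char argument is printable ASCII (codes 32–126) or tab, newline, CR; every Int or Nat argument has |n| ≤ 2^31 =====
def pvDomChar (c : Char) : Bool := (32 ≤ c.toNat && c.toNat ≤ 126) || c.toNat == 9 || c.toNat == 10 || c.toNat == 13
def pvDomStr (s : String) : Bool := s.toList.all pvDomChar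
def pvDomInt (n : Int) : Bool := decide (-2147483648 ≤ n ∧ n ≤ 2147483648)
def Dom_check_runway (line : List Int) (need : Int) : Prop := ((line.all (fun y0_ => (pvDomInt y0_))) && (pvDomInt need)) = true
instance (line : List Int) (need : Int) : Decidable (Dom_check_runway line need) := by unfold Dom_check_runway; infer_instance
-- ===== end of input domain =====

-- B replaces A's boolean mark array (and per-cell inner marking loops) with a single
-- integer `used` = highest index already consumed by a ramp; same return value everywhere.

-- ===== PORT A =====
-- inner loop `for step in range(1, need+1)` of the descending-ramp branch;
-- none = `return False`.  Indices ni are ≥ 1 after the guards, so `.toNat` is exact.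
def pvInnerDown (n i : Int) (steps : List Int) (check : List Bool) : Option (List Bool) :=
  match steps with
  | [] => some check
  | step :: rest =>
    let ni := i + step
    if n ≤ ni then none
    else if check.getD ni.toNat false = false then
      pvInnerDown n i rest (check.set ni.toNat true)
    else none

-- inner loop of the ascending-ramp branch; ni ≥ 0 after the guard, so `.toNat` is exact.
def pvInnerUp (need i : Int) (steps : List Int) (check : List Bool) : Option (List Bool) :=
  match steps with
  | [] => some check
  | step :: rest =>
    let ni := i - need + step
    if ni < 0 then none
    else if check.getD ni.toNat false = false then
      pvInnerUp need i rest (check.set ni.toNat true)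
    else none

-- outer loop `for i in range(len(line)-1)`; every i is ≥ 0, so `.toNat` indexing is exact.
def pvLoopA (line : List Int) (need : Int) (idxs : List Int) (check : List Bool) : Bool :=
  match idxs with
  | [] => true
  | i :: rest =>
    let a := line.getD i.toNat 0
    let b := line.getD (i + 1).toNat 0
    if a = b then pvLoopA line need rest check
    else if 1 < |a - b| then false
    else if b < a then
      match pvInnerDown (line.length : Int) i (PySem.List.pyRange 1 (need + 1) 1) check with
      | some check' => pvLoopA line need rest check'
      | none => false
    else
      match pvInnerUp need i (PySem.List.pyRange 1 (need + 1) 1) check with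
      | some check' => pvLoopA line need rest check'
      | none => false

def check_runway (line : List Int) (need : Int) : Bool :=
  pvLoopA line need (PySem.List.pyRange 0 ((line.length : Int) - 1) 1)
    (List.replicate line.length false)

-- ===== PORT B =====
def pvLoopB (line : List Int) (need : Int) (idxs : List Int) (used : Int) : Bool :=
  match idxs with
  | [] => true
  | i :: rest =>
    let d := line.getD (i + 1).toNat 0 - line.getD i.toNat 0
    if d = 0 then pvLoopB line need rest used
    else if d ≠ 1 ∧ d ≠ -1 then false
    else if need ≤ 0 then pvLoopB line need rest used
    else if d = -1 then
      if (line.length : Int) ≤ i + need ∨ i + 1 ≤ used then false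
      else pvLoopB line need rest (i + need)
    else
      if i - need + 1 < 0 ∨ i - need + 1 ≤ used then false
      else pvLoopB line need rest i

def check_runway_alt (line : List Int) (need : Int) : Bool :=
  pvLoopB line need (PySem.List.pyRange 0 ((line.length : Int) - 1) 1) (-1)

-- ===== PRECONDITION & SPEC =====
def Spec_check_runway (line : List Int) (need : Int) (out : Bool) : Prop := out = check_runway_alt line need
instance (line : List Int) (need : Int) (out : Bool) : Decidable (Spec_check_runway line need out) := by unfold Spec_check_runway; infer_instance

-- ===== CLAIM (what is proved, stated in full; the proofs are below) =====
def Claim_equal_check_runway : Prop := ∀ (line : List Int) (need : Int), Dom_check_runway line need → Spec_check_runway line need (check_runway line need)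

-- ===== LEMMAS AND PROOFS =====

lemma pv_getD_set_ne (l : List Bool) (m k : Nat) (h : m ≠ k) :
    (l.set m true).getD k false = l.getD k false := by
  simp [List.getD_eq_getElem?_getD, List.getElem?_set_ne h]

lemma pv_getD_set_self (l : List Bool) (m : Nat) (h : m < l.length) :
    (l.set m true).getD m false = true := by
  simp [List.getD_eq_getElem?_getD, h]

-- pvInnerDown returns none when the window [i+s, i+need] leaves the runway or hits a mark
lemma pvInnerDown_none (n i need : Int) (hi : 0 ≤ i) :
    ∀ (m : Nat) (s : Int) (check : List Bool), (need - s).toNat = m → 1 ≤ s → s ≤ need →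
    (n ≤ i + need ∨ ∃ k : Nat, i + s ≤ (k : Int) ∧ (k : Int) ≤ i + need ∧ check.getD k false = true) →
    pvInnerDown n i (PySem.List.pyRange s (need + 1) 1) check = none := by
  intro m
  induction m with
  | zero =>
    intro s check hm h1 h2 hbad
    have hs : s = need := by omega
    subst hs
    rw [PySem.List.pyRange_one_cons (by omega)]
    simp only [pvInnerDown]
    rcases hbad with hb | ⟨k, hk1, hk2, hk3⟩
    · rw [if_pos hb]
    · by_cases hn : n ≤ i + s
      · rw [if_pos hn]
      · rw [if_neg hn]
        have hk : (i + s).toNat = k := by omega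
        rw [hk, hk3]
        simp
  | succ m ih =>
    intro s check hm h1 h2 hbad
    rw [PySem.List.pyRange_one_cons (by omega)]
    simp only [pvInnerDown]
    by_cases hn : n ≤ i + s
    · rw [if_pos hn]
    · rw [if_neg hn]
      by_cases hc : check.getD (i + s).toNat false = false
      · rw [if_pos hc]
        rcases hbad with hb | ⟨k, hk1, hk2, hk3⟩
        · exact ih (s + 1) (check.set (i + s).toNat true) (by omega) (by omega) (by omega)
            (Or.inl hb)
        · have hne : (k : Int) ≠ i + s := by
            intro h
            rw [show (i + s).toNat = k by omega] at hc
            rw [hk3] at hc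
            exact Bool.true_eq_false.mp hc
          refine ih (s + 1) (check.set (i + s).toNat true) (by omega) (by omega) (by omega)
            (Or.inr ⟨k, by omega, hk2, ?_⟩)
          rw [pv_getD_set_ne _ _ _ (by omega)]
          exact hk3
      · rw [if_neg hc]

lemma pvInnerDown_some (n i need : Int) (hi : 0 ≤ i) :
    ∀ (m : Nat) (s : Int) (check : List Bool), (need + 1 - s).toNat = m → 1 ≤ s →
    i + need < n → n = (check.length : Int) →
    (∀ k : Nat, i + s ≤ (k : Int) → (k : Int) ≤ i + need → check.getD k false = false) →
    ∃ check', pvInnerDown n i (PySem.List.pyRange s (need + 1) 1) check = some check' ∧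
      check'.length = check.length ∧
      (∀ k : Nat, (k : Int) < i + s ∨ i + need < (k : Int) → check'.getD k false = check.getD k false) ∧
      (∀ k : Nat, i + s ≤ (k : Int) → (k : Int) ≤ i + need → check'.getD k false = true) := by
  intro m
  induction m with
  | zero =>
    intro s check hm h1 _ _ _
    rw [PySem.List.pyRange_one_eq_nil (by omega)]
    exact ⟨check, rfl, rfl, fun k _ => rfl, fun k hk1 hk2 => by omega⟩
  | succ m ih =>
    intro s check hm h1 hn hlen hfalse
    rw [PySem.List.pyRange_one_cons (by omega)]
    simp only [pvInnerDown]
    rw [if_neg (by omega), if_pos (hfalse (i + s).toNat (by omega) (by omega))]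
    obtain ⟨check', e, hl', hout', hwin'⟩ :=
      ih (s + 1) (check.set (i + s).toNat true) (by omega) (by omega) hn
        (by rw [List.length_set]; exact hlen)
        (fun k hk1 hk2 => by
          rw [pv_getD_set_ne _ _ _ (by omega)]
          exact hfalse k (by omega) hk2)
    refine ⟨check', e, by rw [hl', List.length_set], ?_, ?_⟩
    · intro k hk
      rw [hout' k (by omega), pv_getD_set_ne _ _ _ (by omega)]
    · intro k hk1 hk2
      by_cases hks : (k : Int) = i + s
      · rw [hout' k (by omega), show (i + s).toNat = k by omega]
        exact pv_getD_set_self _ _ (by omega)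
      · exact hwin' k (by omega) hk2

lemma pvInnerUp_none (need i : Int) :
    ∀ (m : Nat) (s : Int) (check : List Bool), (need - s).toNat = m → s ≤ need →
    (i - need + s < 0 ∨ ∃ k : Nat, i - need + s ≤ (k : Int) ∧ (k : Int) ≤ i ∧ check.getD k false = true) →
    pvInnerUp need i (PySem.List.pyRange s (need + 1) 1) check = none := by
  intro m
  induction m with
  | zero =>
    intro s check hm h2 hbad
    have hs : s = need := by omega
    rw [PySem.List.pyRange_one_cons (by omega)]
    simp only [pvInnerUp]
    rcases hbad with hb | ⟨k, hk1, hk2, hk3⟩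
    · rw [if_pos (by omega)]
    · by_cases hneg : i - need + s < 0
      · rw [if_pos hneg]
      · rw [if_neg hneg]
        have hk : (i - need + s).toNat = k := by omega
        rw [hk, hk3]
        simp
  | succ m ih =>
    intro s check hm h2 hbad
    rw [PySem.List.pyRange_one_cons (by omega)]
    simp only [pvInnerUp]
    by_cases hneg : i - need + s < 0
    · rw [if_pos hneg]
    · rw [if_neg hneg]
      by_cases hc : check.getD (i - need + s).toNat false = false
      · rw [if_pos hc]
        rcases hbad with hb | ⟨k, hk1, hk2, hk3⟩
        · omega
        · have hne : (k : Int) ≠ i - need + s := by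
            intro h
            rw [show (i - need + s).toNat = k by omega] at hc
            rw [hk3] at hc
            exact Bool.true_eq_false.mp hc
          refine ih (s + 1) (check.set (i - need + s).toNat true) (by omega) (by omega)
            (Or.inr ⟨k, by omega, hk2, ?_⟩)
          rw [pv_getD_set_ne _ _ _ (by omega)]
          exact hk3
      · rw [if_neg hc]

lemma pvInnerUp_some (need i : Int) :
    ∀ (m : Nat) (s : Int) (check : List Bool), (need + 1 - s).toNat = m →
    0 ≤ i - need + s → i < (check.length : Int) →
    (∀ k : Nat, i - need + s ≤ (k : Int) → (k : Int) ≤ i → check.getD k false = false) →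
    ∃ check', pvInnerUp need i (PySem.List.pyRange s (need + 1) 1) check = some check' ∧
      check'.length = check.length ∧
      (∀ k : Nat, (k : Int) < i - need + s ∨ i < (k : Int) → check'.getD k false = check.getD k false) ∧
      (∀ k : Nat, i - need + s ≤ (k : Int) → (k : Int) ≤ i → check'.getD k false = true) := by
  intro m
  induction m with
  | zero =>
    intro s check hm _ _ _
    rw [PySem.List.pyRange_one_eq_nil (by omega)]
    exact ⟨check, rfl, rfl, fun k _ => rfl, fun k hk1 hk2 => by omega⟩
  | succ m ih =>
    intro s check hm h0 hil hfalse
    rw [PySem.List.pyRange_one_cons (by omega)]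
    simp only [pvInnerUp]
    rw [if_neg (by omega), if_pos (hfalse (i - need + s).toNat (by omega) (by omega))]
    obtain ⟨check', e, hl', hout', hwin'⟩ :=
      ih (s + 1) (check.set (i - need + s).toNat true) (by omega) (by omega)
        (by rw [List.length_set]; exact hil)
        (fun k hk1 hk2 => by
          rw [pv_getD_set_ne _ _ _ (by omega)]
          exact hfalse k (by omega) hk2)
    refine ⟨check', e, by rw [hl', List.length_set], ?_, ?_⟩
    · intro k hk
      rw [hout' k (by omega), pv_getD_set_ne _ _ _ (by omega)]
    · intro k hk1 hk2
      by_cases hks : (k : Int) = i - need + s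
      · rw [hout' k (by omega), show (i - need + s).toNat = k by omega]
        exact pv_getD_set_self _ _ (by omega)
      · exact hwin' k (by omega) hk2

-- main loop equivalence, with the invariant relating `check` to `used`
lemma pvLoops_eq (line : List Int) (need : Int) :
    ∀ (m : Nat) (i used : Int) (check : List Bool),
    ((line.length : Int) - 1 - i).toNat = m → 0 ≤ i →
    check.length = line.length →
    -1 ≤ used → used < (line.length : Int) →
    (0 ≤ used → used ≤ i - 1 + need ∧ 1 ≤ need) →
    (∀ k : Nat, used < (k : Int) → check.getD k false = false) →
    (∀ k : Nat, 0 ≤ used → used - need + 1 ≤ (k : Int) → (k : Int) ≤ used → check.getD k false = true) →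
    pvLoopA line need (PySem.List.pyRange i ((line.length : Int) - 1) 1) check =
    pvLoopB line need (PySem.List.pyRange i ((line.length : Int) - 1) 1) used := by
  intro m
  induction m with
  | zero =>
    intro i used check hm hi hlen hu1 hu2 hu3 hu4 hu5
    rw [PySem.List.pyRange_one_eq_nil (by omega)]
    rfl
  | succ m ih =>
    intro i used check hm hi hlen hu1 hu2 hu3 hu4 hu5
    have hlt : i < (line.length : Int) - 1 := by omega
    rw [PySem.List.pyRange_one_cons hlt]
    simp only [pvLoopA, pvLoopB]
    by_cases hab : line.getD i.toNat 0 = line.getD (i + 1).toNat 0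
    · rw [if_pos hab, if_pos (by omega : line.getD (i + 1).toNat 0 - line.getD i.toNat 0 = 0)]
      exact ih (i + 1) used check (by omega) (by omega) hlen hu1 hu2
        (fun h0 => ⟨by have := (hu3 h0).1; omega, (hu3 h0).2⟩) hu4 hu5
    · rw [if_neg hab]
      by_cases habs : 1 < |line.getD i.toNat 0 - line.getD (i + 1).toNat 0|
      · rw [if_pos habs, if_neg (by omega : ¬ line.getD (i + 1).toNat 0 - line.getD i.toNat 0 = 0)]
        rcases lt_abs.mp habs with h | h
        · rw [if_pos (by constructor <;> omega)]
        · rw [if_pos (by constructor <;> omega)]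
      · rw [if_neg habs]
        have habs' := abs_le.mp (not_lt.mp habs)
        have hd : line.getD (i + 1).toNat 0 - line.getD i.toNat 0 = 1 ∨
            line.getD (i + 1).toNat 0 - line.getD i.toNat 0 = -1 := by omega
        rw [if_neg (by omega : ¬ line.getD (i + 1).toNat 0 - line.getD i.toNat 0 = 0),
          if_neg (show ¬ (line.getD (i + 1).toNat 0 - line.getD i.toNat 0 ≠ 1 ∧
            line.getD (i + 1).toNat 0 - line.getD i.toNat 0 ≠ -1) by omega)]
        by_cases hneed : need ≤ 0
        · rw [if_pos hneed, PySem.List.pyRange_one_eq_nil (by omega : need + 1 ≤ 1)]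
          have recur := ih (i + 1) used check (by omega) (by omega) hlen hu1 hu2
            (fun h0 => absurd (hu3 h0).2 (by omega)) hu4 hu5
          by_cases hba : line.getD (i + 1).toNat 0 < line.getD i.toNat 0
          · rw [if_pos hba]
            simp only [pvInnerDown]
            exact recur
          · rw [if_neg hba]
            simp only [pvInnerUp]
            exact recur
        · rw [if_neg hneed]
          rcases hd with hd | hd
          · -- ascent
            rw [if_neg (by omega : ¬ line.getD (i + 1).toNat 0 < line.getD i.toNat 0),
              if_neg (by omega : ¬ line.getD (i + 1).toNat 0 - line.getD i.toNat 0 = -1)]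
            by_cases hfail : i - need + 1 < 0 ∨ i - need + 1 ≤ used
            · rw [if_pos hfail]
              have hnone : pvInnerUp need i (PySem.List.pyRange 1 (need + 1) 1) check = none := by
                by_cases hr : i - need + 1 < 0
                · exact pvInnerUp_none need i (need - 1).toNat 1 check (by omega) (by omega)
                    (Or.inl (by omega))
                · have hf : i - need + 1 ≤ used := by omega
                  have h0u : 0 ≤ used := by omega
                  obtain ⟨h3a, h3b⟩ := hu3 h0u
                  by_cases hui : used ≤ i
                  · exact pvInnerUp_none need i (need - 1).toNat 1 check (by omega) (by omega)
                      (Or.inr ⟨used.toNat, by omega, by omega,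
                        hu5 used.toNat h0u (by omega) (by omega)⟩)
                  · exact pvInnerUp_none need i (need - 1).toNat 1 check (by omega) (by omega)
                      (Or.inr ⟨(used - need + 1).toNat, by omega, by omega,
                        hu5 (used - need + 1).toNat h0u (by omega) (by omega)⟩)
              rw [hnone]
            · rw [if_neg hfail]
              have hr : 0 ≤ i - need + 1 ∧ used < i - need + 1 := by omega
              obtain ⟨check', e, hl', hout', hwin'⟩ :=
                pvInnerUp_some need i need.toNat 1 check (by omega) (by omega) (by omega)
                  (fun k hk1 hk2 => hu4 k (by omega))
              rw [e]
              refine ih (i + 1) i check' (by omega) (by omega) (hl'.trans hlen)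
                (by omega) (by omega) (fun _ => ⟨by omega, by omega⟩) ?_ ?_
              · intro k hk
                rw [hout' k (by omega)]
                exact hu4 k (by omega)
              · intro k _ hk1 hk2
                exact hwin' k (by omega) (by omega)
          · -- descent
            rw [if_pos (by omega : line.getD (i + 1).toNat 0 < line.getD i.toNat 0),
              if_pos hd]
            by_cases hfail : (line.length : Int) ≤ i + need ∨ i + 1 ≤ used
            · rw [if_pos hfail]
              have hnone : pvInnerDown (line.length : Int) i
                  (PySem.List.pyRange 1 (need + 1) 1) check = none := by
                by_cases hu : i + 1 ≤ used
                · have h0u : 0 ≤ used := by omega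
                  obtain ⟨h3a, h3b⟩ := hu3 h0u
                  exact pvInnerDown_none (line.length : Int) i need hi (need - 1).toNat 1 check
                    (by omega) (by omega) (by omega)
                    (Or.inr ⟨used.toNat, by omega, by omega,
                      hu5 used.toNat h0u (by omega) (by omega)⟩)
                · exact pvInnerDown_none (line.length : Int) i need hi (need - 1).toNat 1 check
                    (by omega) (by omega) (by omega) (Or.inl (by omega))
              rw [hnone]
            · rw [if_neg hfail]
              have hr : i + need < (line.length : Int) ∧ used ≤ i := by omega
              obtain ⟨check', e, hl', hout', hwin'⟩ :=
                pvInnerDown_some (line.length : Int) i need hi need.toNat 1 check (by omega)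
                  (by omega) (by omega) (by omega : ((line.length : Int)) = (check.length : Int))
                  (fun k hk1 hk2 => hu4 k (by omega))
              rw [e]
              refine ih (i + 1) (i + need) check' (by omega) (by omega) (hl'.trans hlen)
                (by omega) (by omega) (fun _ => ⟨by omega, by omega⟩) ?_ ?_
              · intro k hk
                rw [hout' k (by omega)]
                exact hu4 k (by omega)
              · intro k _ hk1 hk2
                exact hwin' k (by omega) (by omega)

-- ===== VERDICT (by name: the statement is the Claim_ definition above) =====
theorem check_runway_spec : Claim_equal_check_runway := by
  intro line need _
  unfold Spec_check_runway check_runway check_runway_alt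
  exact pvLoops_eq line need ((line.length : Int) - 1 - 0).toNat 0 (-1)
    (List.replicate line.length false) rfl le_rfl (by simp) (by omega)
    (by omega)
    (by omega)
    (by intro k _; simp)
    (by intro k h; omega)
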